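-- pv_equiv track=rewrite | github.com/zenniskayy2k4/Dreamhack | Level 3/rev/Honest/run.py | calculate
-- ===== SOURCE A (Python) =====
-- def calculate(param_1):
--     param_1 = param_1 & 0xFF
--     bVar1 = (param_1 >> 6 | (param_1 ^ 0x3c) * 4) & 0xFF
--     bVar1 = (bVar1 * 5 + 0x7d) & 0xFF
--     bVar1 = ((bVar1 * 32) | (bVar1 >> 3)) & 0xFF
--     bVar1 = (bVar1 ^ 0xb2) & 0xFF
--     bVar1 = ((bVar1 >> 4) | (bVar1 << 4)) & 0xFF
--     bVar1 = (bVar1 * 3 - 0x2f) & 0xFF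
--     local_e = ((bVar1 >> 7) | (bVar1 * 2)) & 0xFF
--     local_e = (local_e ^ 0xd4) & 0xFF
--
--     result = 0
--     for i in range(8):
--         result = (result << 1) | (local_e & 1)
--         local_e >>= 1
--     return result
-- ===== SOURCE B (Python) =====
-- def _rotl8(b, k):
--     return ((b << k) | (b >> (8 - k))) & 0xFF
--
-- def _rev8(b):
--     return ((b * 0x0202020202) & 0x010884422010) % 1023
--
-- def calculate(param_1):
--     b = _rotl8((param_1 & 0xFF) ^ 0x3C, 2)
--     b = (b * 5 + 0x7D) & 0xFF
--     b = _rotl8(b, 5)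
--     b = _rotl8(b ^ 0xB2, 4)
--     b = (b * 3 + 0xD1) & 0xFF
--     b = _rotl8(b, 1)
--     return _rev8(b ^ 0xD4)
-- ===== Notes on version B (the rewrite author's own statement) =====
-- stated objective: alternative
-- what changed: B recasts each of A's shift-or-mask pairs as a call to a byte rotate-left helper, folds the subtraction into an addition on bytes, and replaces A's final bit-reversal loop with the loop-free closed-form byte reversal via multiply, mask and modulus.
import Mathlib
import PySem

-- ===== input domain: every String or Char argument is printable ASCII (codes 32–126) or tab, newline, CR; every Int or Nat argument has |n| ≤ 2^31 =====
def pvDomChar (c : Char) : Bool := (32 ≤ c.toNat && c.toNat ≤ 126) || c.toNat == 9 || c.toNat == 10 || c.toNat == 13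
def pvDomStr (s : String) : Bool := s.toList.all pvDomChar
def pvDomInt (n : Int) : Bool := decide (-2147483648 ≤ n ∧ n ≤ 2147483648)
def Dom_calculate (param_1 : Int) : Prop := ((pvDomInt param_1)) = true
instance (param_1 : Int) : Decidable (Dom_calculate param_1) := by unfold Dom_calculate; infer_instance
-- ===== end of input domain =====

-- B rewrites the pipeline around a byte rotate-left helper (each shift-or-mask pair in A is a
-- rotation) and replaces A's bit-reversal loop by a loop-free multiply/mask/mod
-- byte reversal (objective: alternative, not claimed faster).

-- ===== PORT A =====
def calculate (param_1 : Int) : Int :=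
  let param_1 := PySem.Int.band param_1 0xFF
  let bVar1 := PySem.Int.band (PySem.Int.bor (param_1 >>> 6) ((PySem.Int.bxor param_1 0x3c) * 4)) 0xFF
  let bVar1 := PySem.Int.band (bVar1 * 5 + 0x7d) 0xFF
  let bVar1 := PySem.Int.band (PySem.Int.bor (bVar1 * 32) (bVar1 >>> 3)) 0xFF
  let bVar1 := PySem.Int.band (PySem.Int.bxor bVar1 0xb2) 0xFF
  let bVar1 := PySem.Int.band (PySem.Int.bor (bVar1 >>> 4) (bVar1 <<< 4)) 0xFF
  let bVar1 := PySem.Int.band (bVar1 * 3 - 0x2f) 0xFF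
  let local_e := PySem.Int.band (PySem.Int.bor (bVar1 >>> 7) (bVar1 * 2)) 0xFF
  let local_e := PySem.Int.band (PySem.Int.bxor local_e 0xd4) 0xFF
  let st := (List.range 8).foldl
    (fun (st : Int × Int) _ => (PySem.Int.bor (st.1 <<< 1) (PySem.Int.band st.2 1), st.2 >>> 1))
    ((0 : Int), local_e)
  st.1

-- ===== PORT B =====
def rotl8 (b k : Int) : Int :=
  PySem.Int.band (PySem.Int.bor (b <<< k) (b >>> (8 - k))) 0xFF

def rev8 (b : Int) : Int :=
  PySem.Int.mod (PySem.Int.band (b * 0x0202020202) 0x010884422010) 1023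

def calculate_alt (param_1 : Int) : Int :=
  let b := rotl8 (PySem.Int.bxor (PySem.Int.band param_1 0xFF) 0x3C) 2
  let b := PySem.Int.band (b * 5 + 0x7D) 0xFF
  let b := rotl8 b 5
  let b := rotl8 (PySem.Int.bxor b 0xB2) 4
  let b := PySem.Int.band (b * 3 + 0xD1) 0xFF
  let b := rotl8 b 1
  rev8 (PySem.Int.bxor b 0xD4)

-- ===== PRECONDITION & SPEC =====
def Spec_calculate (param_1 : Int) (out : Int) : Prop := out = calculate_alt param_1
instance (param_1 : Int) (out : Int) : Decidable (Spec_calculate param_1 out) := by unfold Spec_calculate; infer_instance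

-- ===== CLAIM (what is proved, stated in full; the proofs are below) =====
def Claim_equal_calculate : Prop := ∀ (param_1 : Int), Dom_calculate param_1 → Spec_calculate param_1 (calculate param_1)

-- ===== LEMMAS AND PROOFS =====

theorem band255_range (n : Int) : 0 ≤ PySem.Int.band n 255 ∧ PySem.Int.band n 255 < 256 := by
  cases n with
  | ofNat m =>
      simp [PySem.Int.band]
      calc m &&& 255 = m % 256 := Nat.and_two_pow_sub_one_eq_mod m 8
        _ < 256 := Nat.mod_lt _ (by norm_num)
  | negSucc m => simp [PySem.Int.band]; omega

theorem calculate_congr (a b : Int) (h : PySem.Int.band a 255 = PySem.Int.band b 255) :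
    calculate a = calculate b := by unfold calculate; rw [h]

theorem calculate_alt_congr (a b : Int) (h : PySem.Int.band a 255 = PySem.Int.band b 255) :
    calculate_alt a = calculate_alt b := by unfold calculate_alt; rw [h]

set_option maxRecDepth 100000 in
theorem byte_case : ∀ k : Fin 256, calculate (k.val : Int) = calculate_alt (k.val : Int) := by decide

theorem band255_idem (n : Int) :
    PySem.Int.band (((PySem.Int.band n 255).toNat : Nat) : Int) 255 = PySem.Int.band n 255 := by
  obtain ⟨h0, h1⟩ := band255_range n
  have hk : (PySem.Int.band n 255).toNat < 256 := by omega
  calc PySem.Int.band (((PySem.Int.band n 255).toNat : Nat) : Int) 255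
      = PySem.Int.band (((PySem.Int.band n 255).toNat : Nat) : Int) ((255 : Nat) : Int) := rfl
    _ = (((PySem.Int.band n 255).toNat &&& 255 : Nat) : Int) := PySem.Int.band_natCast _ _
    _ = (((PySem.Int.band n 255).toNat % 256 : Nat) : Int) := by
          rw [Nat.and_two_pow_sub_one_eq_mod _ 8]
    _ = (((PySem.Int.band n 255).toNat : Nat) : Int) := by rw [Nat.mod_eq_of_lt hk]
    _ = PySem.Int.band n 255 := Int.toNat_of_nonneg h0

-- ===== VERDICT (by name: the statement is the Claim_ definition above) =====
theorem calculate_spec : Claim_equal_calculate := by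
  intro n _
  unfold Spec_calculate
  obtain ⟨h0, h1⟩ := band255_range n
  have hk : (PySem.Int.band n 255).toNat < 256 := by omega
  calc calculate n = calculate (((PySem.Int.band n 255).toNat : Nat) : Int) :=
        (calculate_congr _ _ (band255_idem n)).symm
    _ = calculate_alt (((PySem.Int.band n 255).toNat : Nat) : Int) := byte_case ⟨_, hk⟩
    _ = calculate_alt n := calculate_alt_congr _ _ (band255_idem n)
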